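-- pv_equiv track=rewrite | github.com/RBelachew/JOBOT | Server_JobBot/server.py | is_document_eligible
-- ===== SOURCE A (Python) =====
-- def help_is_document_eligible(document, titles, cities, other_list):
--     list_with_other = []
--     rest_list = []
--
--     for item in titles:
--         if item == "Other":
--             list_with_other.append(item)
--         else:
--             rest_list.append(item)
--
--     result_other = is_document_eligible(document, list_with_other, cities, other_list)
--     result = is_document_eligible(document, rest_list, cities, other_list)
--     return result or result_other
--
-- def is_document_eligible(document, titles, cities, other_list):
--     job_words = set(document["job"].lower().split())
--     city_doc = document["city"]
--
--     if "Other" in titles: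
--         if len(titles) > 1:  # Other + Something
--             return help_is_document_eligible(document, titles, cities, other_list)
--         else:
--             if city_doc in cities and document["job"].lower() not in other_list:
--                 return True
--     else:
--         for job_title in titles:
--             title_words = set(job_title.lower().split())
--             if title_words.issubset(job_words) and city_doc in cities:
--                 return True
--             elif all(word in document["description"].lower() for word in title_words) and city_doc in cities:
--                 return True
--     return False
-- ===== SOURCE B (Python) =====
-- def is_document_eligible(document, titles, cities, other_list):
--     job_lower = document["job"].lower()
--     city_ok = document["city"] in cities
--     desc = document["description"].lower()
--     if not city_ok:
--         return False
--     job_words = set(job_lower.split())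
--     for title in titles:
--         if title == "Other":
--             if job_lower not in other_list:
--                 return True
--         else:
--             title_words = set(title.lower().split())
--             if title_words <= job_words or all(w in desc for w in title_words):
--                 return True
--     return False
-- ===== Notes on version B (the rewrite author's own statement) =====
-- stated objective: simpler
-- what changed: Replaces A's mutual recursion that splits titles into an 'Other' list and a rest list with a single flat pass over titles (early city check, inline branch for the 'Other' element).
-- outside the precondition, e.g. on is_document_eligible({'job': 'x', 'city': 'y'}, [], [], []): A returns False, B raises KeyError
import Mathlib
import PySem

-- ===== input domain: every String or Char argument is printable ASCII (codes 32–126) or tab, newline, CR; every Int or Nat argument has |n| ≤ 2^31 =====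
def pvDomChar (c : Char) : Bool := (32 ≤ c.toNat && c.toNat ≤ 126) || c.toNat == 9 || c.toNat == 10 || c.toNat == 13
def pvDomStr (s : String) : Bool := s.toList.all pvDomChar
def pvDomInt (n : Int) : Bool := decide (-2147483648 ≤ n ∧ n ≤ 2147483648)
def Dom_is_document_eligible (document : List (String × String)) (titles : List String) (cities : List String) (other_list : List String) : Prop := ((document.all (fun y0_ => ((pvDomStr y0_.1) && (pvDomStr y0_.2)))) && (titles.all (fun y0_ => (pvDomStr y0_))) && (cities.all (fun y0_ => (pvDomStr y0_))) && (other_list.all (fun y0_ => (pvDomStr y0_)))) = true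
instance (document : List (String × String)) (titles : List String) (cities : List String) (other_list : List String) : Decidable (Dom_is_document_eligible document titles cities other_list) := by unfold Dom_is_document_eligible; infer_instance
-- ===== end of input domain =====

-- B replaces A's mutual recursion (split titles into 'Other'-list and rest, recurse on both)
-- with one flat pass over titles behind an early city check; return-value equivalence only.

-- ===== PORT A =====
-- the loop in help_is_document_eligible: split titles into ([items == "Other"], [the rest])
def ideSplitOther (titles : List String) : List String × List String :=
  titles.foldl
    (fun p item => if item == "Other" then (p.1 ++ [item], p.2) else (p.1, p.2 ++ [item]))
    ([], [])

-- the 'for job_title in titles' loop of A's else-branch (early return → recursion on the list)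
def ideLoop (document : List (String × String)) (cities : List String)
    (job_words : PySem.Set String) (city_doc : String) : List String → Bool
  | [] => false
  | job_title :: rest =>
    let title_words := PySem.Set.ofList (PySem.Str.split₀ (PySem.Str.lower job_title))
    if PySem.Set.issubset title_words job_words && cities.contains city_doc then true
    else if title_words.all
        (fun word => PySem.Str.isIn word
          (PySem.Str.lower ((PySem.Dict.mk document).getD "description" "")))
        && cities.contains city_doc then true
    else ideLoop document cities job_words city_doc rest

-- A's mutual recursion (is_document_eligible ↔ help_is_document_eligible), made total with
-- fuel: with at most one "Other" in titles (Pre_) the recursion depth is at most 2, so the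
-- fuel passed below never runs out on admitted inputs; Python A recurses forever otherwise.
def ideGo (document : List (String × String)) (cities other_list : List String) :
    Nat → List String → Bool
  | 0, _ => false
  | fuel + 1, titles =>
    let job_words := PySem.Set.ofList
      (PySem.Str.split₀ (PySem.Str.lower ((PySem.Dict.mk document).getD "job" "")))
    let city_doc := (PySem.Dict.mk document).getD "city" ""
    if titles.contains "Other" then
      if titles.length > 1 then
        -- help_is_document_eligible
        let p := ideSplitOther titles
        let result_other := ideGo document cities other_list fuel p.1
        let result := ideGo document cities other_list fuel p.2
        result || result_other
      else
        if cities.contains city_doc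
            && !(other_list.contains (PySem.Str.lower ((PySem.Dict.mk document).getD "job" "")))
        then true else false
    else ideLoop document cities job_words city_doc titles

def is_document_eligible (document : List (String × String)) (titles : List String) (cities : List String) (other_list : List String) : Bool :=
  ideGo document cities other_list (titles.length + 2) titles

-- ===== PORT B =====
def altTitleHit (job_words : PySem.Set String) (job_lower desc : String)
    (other_list : List String) (title : String) : Bool :=
  if title == "Other" then !(other_list.contains job_lower)
  else
    let title_words := PySem.Set.ofList (PySem.Str.split₀ (PySem.Str.lower title))
    PySem.Set.issubset title_words job_words
      || title_words.all (fun w => PySem.Str.isIn w desc)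

def is_document_eligible_alt (document : List (String × String)) (titles : List String) (cities : List String) (other_list : List String) : Bool :=
  let job_lower := PySem.Str.lower ((PySem.Dict.mk document).getD "job" "")
  let city_ok := cities.contains ((PySem.Dict.mk document).getD "city" "")
  let desc := PySem.Str.lower ((PySem.Dict.mk document).getD "description" "")
  if !city_ok then false
  else
    let job_words := PySem.Set.ofList (PySem.Str.split₀ job_lower)
    titles.any (altTitleHit job_words job_lower desc other_list)

-- ===== PRECONDITION & SPEC =====
-- Pre_ excludes documents missing the "job", "city" or "description" key (A raises KeyError
-- whenever it reads a missing one, though on a few inputs — e.g. empty titles — A returns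
-- before touching "description" while B reads all three up front), and titles containing
-- "Other" more than once, on which A recurses forever (RecursionError).
def Pre_is_document_eligible (document : List (String × String)) (titles : List String) (cities : List String) (other_list : List String) : Prop :=
  ((PySem.Dict.mk document).get? "job").isSome
  ∧ ((PySem.Dict.mk document).get? "city").isSome
  ∧ ((PySem.Dict.mk document).get? "description").isSome
  ∧ titles.count "Other" ≤ 1
instance (document : List (String × String)) (titles : List String) (cities : List String) (other_list : List String) : Decidable (Pre_is_document_eligible document titles cities other_list) := by unfold Pre_is_document_eligible; infer_instance

def pvWitness_is_document_eligible : (List (String × String)) × List String × List String × List String :=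
  ([("job", "dev"), ("city", "tlv"), ("description", "a dev job")],
   ["Other", "dev"], ["tlv"], ["clerk"])

def Spec_is_document_eligible (document : List (String × String)) (titles : List String) (cities : List String) (other_list : List String) (out : Bool) : Prop := out = is_document_eligible_alt document titles cities other_list
instance (document : List (String × String)) (titles : List String) (cities : List String) (other_list : List String) (out : Bool) : Decidable (Spec_is_document_eligible document titles cities other_list out) := by unfold Spec_is_document_eligible; infer_instance

-- ===== CLAIM (what is proved, stated in full; the proofs are below) =====
def Claim_equal_is_document_eligible : Prop := ∀ (document : List (String × String)) (titles : List String) (cities : List String) (other_list : List String), Dom_is_document_eligible document titles cities other_list → Pre_is_document_eligible document titles cities other_list → Spec_is_document_eligible document titles cities other_list (is_document_eligible document titles cities other_list)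

-- ===== LEMMAS AND PROOFS =====

-- the per-title test of A's non-"Other" loop
def ideTrig (document : List (String × String)) (job_words : PySem.Set String) (title : String) : Bool :=
  let title_words := PySem.Set.ofList (PySem.Str.split₀ (PySem.Str.lower title))
  PySem.Set.issubset title_words job_words
    || title_words.all (fun word => PySem.Str.isIn word
        (PySem.Str.lower ((PySem.Dict.mk document).getD "description" "")))

theorem setAll_eq (l : List String) (f : String → Bool) :
    (PySem.Set.ofList l : List String).all f = l.all f := by
  apply Bool.eq_iff_iff.mpr
  simp [List.all_eq_true, PySem.Set.mem_ofList]

theorem ideLoop_eq (document : List (String × String)) (cities : List String)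
    (jw : PySem.Set String) (city : String) (ts : List String) :
    ideLoop document cities jw city ts
      = (cities.contains city && ts.any (ideTrig document jw)) := by
  induction ts with
  | nil => simp [ideLoop]
  | cons t rest ih =>
    simp only [ideLoop, ideTrig, List.any_cons, ih, setAll_eq]
    cases cities.contains city <;> cases PySem.Set.issubset
        (PySem.Set.ofList (PySem.Str.split₀ (PySem.Str.lower t))) jw <;>
      (try simp) <;> (try (apply Bool.eq_iff_iff.mpr; simp [List.all_eq_true]))

theorem ideSplitOther_foldl (l : List String) (a b : List String) :
    l.foldl (fun p item => if item == "Other" then (p.1 ++ [item], p.2) else (p.1, p.2 ++ [item])) (a, b)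
      = (a ++ l.filter (· == "Other"), b ++ l.filter (fun t => !(t == "Other"))) := by
  induction l generalizing a b with
  | nil => simp
  | cons x xs ih =>
    rw [List.foldl_cons]
    cases hx : x == "Other"
    · simp only [Bool.false_eq_true, if_false]
      rw [ih]
      simp [hx]
    · simp only [if_true]
      rw [ih]
      simp_all

theorem ideSplitOther_eq (l : List String) :
    ideSplitOther l = (l.filter (· == "Other"), l.filter (fun t => !(t == "Other"))) := by
  simpa [ideSplitOther] using ideSplitOther_foldl l [] []

theorem any_partition (l : List String) (p f : String → Bool) :
    l.any f = ((l.filter p).any f || (l.filter (fun x => !(p x))).any f) := by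
  induction l with
  | nil => simp
  | cons x xs ih =>
    cases hp : p x <;> simp [hp, ih] <;>
      cases f x <;> simp [Bool.or_comm]

-- A's no-"Other" path equals B's per-title test over those titles
theorem ideGo_noOther (document : List (String × String)) (cities other_list : List String)
    (fuel : Nat) (ts : List String) (h : "Other" ∉ ts) :
    ideGo document cities other_list (fuel + 1) ts
      = (cities.contains ((PySem.Dict.mk document).getD "city" "")
          && ts.any (altTitleHit
              (PySem.Set.ofList (PySem.Str.split₀ (PySem.Str.lower ((PySem.Dict.mk document).getD "job" ""))))
              (PySem.Str.lower ((PySem.Dict.mk document).getD "job" ""))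
              (PySem.Str.lower ((PySem.Dict.mk document).getD "description" ""))
              other_list)) := by
  have hc : ts.contains "Other" = false := by
    simp [List.contains_eq_mem, h]
  simp only [ideGo, hc, Bool.false_eq_true, if_false, ideLoop_eq]
  congr 1
  refine PySem.List.any_congr_mem (fun t ht => ?_)
  have hne : ¬ (t = "Other") := fun he => h (he ▸ ht)
  simp [ideTrig, altTitleHit, hne]

theorem ideGo_otherOnly (document : List (String × String)) (cities other_list : List String)
    (fuel : Nat) :
    ideGo document cities other_list (fuel + 1) ["Other"]
      = (cities.contains ((PySem.Dict.mk document).getD "city" "")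
          && !(other_list.contains (PySem.Str.lower ((PySem.Dict.mk document).getD "job" "")))) := by
  simp only [ideGo]
  norm_num

theorem alt_eq_any (document : List (String × String)) (titles cities other_list : List String) :
    is_document_eligible_alt document titles cities other_list
      = (cities.contains ((PySem.Dict.mk document).getD "city" "")
          && titles.any (altTitleHit
              (PySem.Set.ofList (PySem.Str.split₀ (PySem.Str.lower ((PySem.Dict.mk document).getD "job" ""))))
              (PySem.Str.lower ((PySem.Dict.mk document).getD "job" ""))
              (PySem.Str.lower ((PySem.Dict.mk document).getD "description" ""))
              other_list)) := by
  simp only [is_document_eligible_alt]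
  cases cities.contains ((PySem.Dict.mk document).getD "city" "") <;> simp

theorem ideGo_main (document : List (String × String)) (titles cities other_list : List String)
    (fuel : Nat) (hcount : titles.count "Other" ≤ 1) :
    ideGo document cities other_list (fuel + 2) titles
      = is_document_eligible_alt document titles cities other_list := by
  rw [alt_eq_any]
  by_cases hmem : "Other" ∈ titles
  · have hcnt1 : titles.count "Other" = 1 := by
      have := List.count_pos_iff.mpr hmem
      omega
    have hfil : titles.filter (· == "Other") = ["Other"] := by
      rw [List.filter_beq (l := titles) (a := "Other"), hcnt1]; rfl
    have hcontains : titles.contains "Other" = true := by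
      simp [List.contains_eq_mem, hmem]
    by_cases hlen : titles.length > 1
    · -- the help_is_document_eligible branch
      rw [ideGo]
      simp only [hcontains, if_true, hlen, ideSplitOther_eq, hfil]
      rw [ideGo_otherOnly]
      rw [ideGo_noOther document cities other_list fuel _ (by simp)]
      rw [any_partition titles (· == "Other") _, hfil]
      cases cities.contains ((PySem.Dict.mk document).getD "city" "") <;>
        simp [altTitleHit, Bool.or_comm]
    · -- titles = ["Other"]
      have hlen1 : titles.length = 1 := by
        have : 1 ≤ titles.length := List.length_pos_of_mem hmem
        omega
      have hts : titles = ["Other"] := by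
        obtain ⟨t, ht0⟩ : ∃ t, titles = [t] := List.length_eq_one_iff.mp hlen1
        subst ht0
        have ht : "Other" = t := by simpa using hmem
        rw [← ht]
      subst hts
      rw [ideGo_otherOnly]
      simp [altTitleHit]
  · exact ideGo_noOther document cities other_list (fuel + 1) titles hmem

-- ===== VERDICT (by name: the statement is the Claim_ definition above) =====
theorem is_document_eligible_spec : Claim_equal_is_document_eligible := by
  intro document titles cities other_list _hdom hpre
  unfold Spec_is_document_eligible
  unfold is_document_eligible
  exact ideGo_main document titles cities other_list titles.length hpre.2.2.2
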